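-- pv_equiv track=rewrite | github.com/vsoeiro/driver | backend/services/cron_utils.py | _parse_token
-- ===== SOURCE A (Python) =====
-- def _parse_token(token: str, min_value: int, max_value: int) -> set[int]:
--     if "/" in token:
--         base, step_raw = token.split("/", 1)
--         step = _parse_int(step_raw, min_value=1, max_value=max_value - min_value + 1)
--         base_values = (
--             set(range(min_value, max_value + 1))
--             if base == "*"
--             else _parse_token(base, min_value, max_value)
--         )
--         start = min(base_values)
--         return {v for v in sorted(base_values) if (v - start) % step == 0}
--
--     if token == "*":
--         return set(range(min_value, max_value + 1))
--
--     if "-" in token: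
--         start_raw, end_raw = token.split("-", 1)
--         start = _parse_int(start_raw, min_value=min_value, max_value=max_value)
--         end = _parse_int(end_raw, min_value=min_value, max_value=max_value)
--         if start > end:
--             raise ValueError(f"Invalid range '{token}'")
--         return set(range(start, end + 1))
--
--     value = _parse_int(token, min_value=min_value, max_value=max_value)
--     return {value}
--
-- def _parse_int(raw: str, min_value: int, max_value: int) -> int:
--     try:
--         value = int(raw)
--     except ValueError as exc:
--         raise ValueError(f"Invalid integer '{raw}'") from exc
--     if not min_value <= value <= max_value:
--         raise ValueError(f"Value '{value}' outside range [{min_value}, {max_value}]")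
--     return value
-- ===== SOURCE B (Python) =====
-- def _parse_int(raw: str, min_value: int, max_value: int) -> int:
--     try:
--         value = int(raw)
--     except ValueError as exc:
--         raise ValueError(f"Invalid integer '{raw}'") from exc
--     if not min_value <= value <= max_value:
--         raise ValueError(f"Value '{value}' outside range [{min_value}, {max_value}]")
--     return value
--
--
-- def _parse_token(token: str, min_value: int, max_value: int) -> set[int]:
--     # Split off the step first (same validation order as the original), then
--     # derive the contiguous base bounds and emit the stepped range directly.
--     if "/" in token:
--         base, step_raw = token.split("/", 1)
--         step = _parse_int(step_raw, min_value=1, max_value=max_value - min_value + 1)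
--     else:
--         base, step = token, 1
--     if base == "*":
--         start, end = min_value, max_value
--     elif "-" in base:
--         start_raw, end_raw = base.split("-", 1)
--         start = _parse_int(start_raw, min_value=min_value, max_value=max_value)
--         end = _parse_int(end_raw, min_value=min_value, max_value=max_value)
--         if start > end:
--             raise ValueError(f"Invalid range '{base}'")
--     else:
--         start = _parse_int(base, min_value=min_value, max_value=max_value)
--         end = start
--     return set(range(start, end + 1, step))
-- ===== Notes on version B (the rewrite author's own statement) =====
-- stated objective: simpler
-- what changed: The '/' branch no longer materialises, sorts and filters the base value set: B parses the step first, derives the base's contiguous (start, end) bounds directly, and returns set(range(start, end+1, step)).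
import Mathlib
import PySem

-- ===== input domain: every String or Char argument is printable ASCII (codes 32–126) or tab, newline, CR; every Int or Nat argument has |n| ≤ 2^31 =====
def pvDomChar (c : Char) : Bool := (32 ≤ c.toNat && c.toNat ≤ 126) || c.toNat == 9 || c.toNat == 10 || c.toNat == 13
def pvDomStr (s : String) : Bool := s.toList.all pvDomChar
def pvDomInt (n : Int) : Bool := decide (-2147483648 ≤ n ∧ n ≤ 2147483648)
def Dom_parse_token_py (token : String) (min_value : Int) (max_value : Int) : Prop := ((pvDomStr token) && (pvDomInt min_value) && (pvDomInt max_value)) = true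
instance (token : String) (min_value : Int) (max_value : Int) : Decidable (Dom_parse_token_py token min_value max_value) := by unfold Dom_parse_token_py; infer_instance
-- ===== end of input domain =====

-- B rewrites the '/' branch: it parses the step first, derives the contiguous base
-- bounds (start, end) directly, and emits range(start, end+1, step), instead of
-- materialising the base set, sorting it and filtering by (v-start) % step.
-- Objective: simpler (no intermediate set/sort/filter). Return sets are compared as sets.

-- shared helper: Python _parse_int (some value, none = ValueError)
def pyParseInt? (raw : String) (mn mx : Int) : Option Int :=
  match PySem.Int.ofStr? raw with
  | none => none
  | some v => if mn ≤ v ∧ v ≤ mx then some v else none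

-- shared helper: s.split(sep, 1) as a pair (sep non-empty, so splitMax? is some)
def splitOnce (s : String) (sep : String) : String × String :=
  match PySem.Str.splitMax? s sep 1 with
  | some [a, b] => (a, b)
  | some [a] => (a, "")
  | _ => ("", "")

-- ===== PORT A =====
-- none = the Python raises.  Fuel 2 suffices on every input: the recursion (on the
-- part of token before the first "/") can only go one level deep, because that part
-- never contains "/" again.
def parseTokenA : Nat → String → Int → Int → Option (List Int)
  | 0, _, _, _ => none
  | fuel + 1, token, mn, mx =>
    if PySem.Str.isIn "/" token then
      match pyParseInt? (splitOnce token "/").2 1 (mx - mn + 1) with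
      | none => none
      | some step =>
        match (if (splitOnce token "/").1 = "*" then some (PySem.Set.ofList (PySem.List.pyRange mn (mx + 1) 1))
               else parseTokenA fuel (splitOnce token "/").1 mn mx) with
        | none => none
        | some base_values =>
          match PySem.List.min? base_values (fun v => v) with
          | none => none  -- min() of an empty set raises
          | some start =>
            some (PySem.Set.ofList
              ((PySem.List.sorted base_values (fun v => v)).filter
                (fun v => PySem.Int.mod (v - start) step == 0)))
    else if token = "*" then
      some (PySem.Set.ofList (PySem.List.pyRange mn (mx + 1) 1))
    else if PySem.Str.isIn "-" token then
      match pyParseInt? (splitOnce token "-").1 mn mx, pyParseInt? (splitOnce token "-").2 mn mx with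
      | some s, some e =>
        if s > e then none else some (PySem.Set.ofList (PySem.List.pyRange s (e + 1) 1))
      | _, _ => none
    else
      match pyParseInt? token mn mx with
      | some v => some [v]
      | none => none

def parse_token_py (token : String) (min_value : Int) (max_value : Int) : List Int :=
  (parseTokenA 2 token min_value max_value).getD []

-- ===== PORT B =====
-- start/end bounds of the base token (no "/" handling here)
def boundsOf? (base : String) (mn mx : Int) : Option (Int × Int) :=
  if base = "*" then some (mn, mx)
  else if PySem.Str.isIn "-" base then
    match pyParseInt? (splitOnce base "-").1 mn mx, pyParseInt? (splitOnce base "-").2 mn mx with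
    | some s, some e => if s > e then none else some (s, e)
    | _, _ => none
  else (pyParseInt? base mn mx).map (fun v => (v, v))

def parseTokenB (token : String) (mn mx : Int) : Option (List Int) :=
  match (if PySem.Str.isIn "/" token then
           (pyParseInt? (splitOnce token "/").2 1 (mx - mn + 1)).map
             (fun st => ((splitOnce token "/").1, st))
         else some (token, 1)) with
  | none => none
  | some (base, step) =>
    match boundsOf? base mn mx with
    | none => none
    | some (s, e) => some (PySem.Set.ofList (PySem.List.pyRange s (e + 1) step))

def parse_token_py_alt (token : String) (min_value : Int) (max_value : Int) : List Int :=
  (parseTokenB token min_value max_value).getD []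

-- ===== PRECONDITION & SPEC =====
-- Pre_ = exactly the inputs on which the Python A returns (raises no ValueError):
-- a valid step after "/" (if any) and a valid base ('*', a non-decreasing in-bounds
-- range, or an in-bounds integer).  The no-"/"-in-base conjunct is always true
-- (split("/",1) puts every "/" in the second piece) and excludes nothing.
def preBase (base : String) (mn mx : Int) : Bool :=
  base == "*" ||
  (if PySem.Str.isIn "-" base then
     match pyParseInt? (splitOnce base "-").1 mn mx, pyParseInt? (splitOnce base "-").2 mn mx with
     | some s, some e => decide (s ≤ e)
     | _, _ => false
   else (pyParseInt? base mn mx).isSome)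

def Pre_parse_token_py (token : String) (min_value : Int) (max_value : Int) : Prop :=
  (if PySem.Str.isIn "/" token then
     (pyParseInt? (splitOnce token "/").2 1 (max_value - min_value + 1)).isSome
       && preBase (splitOnce token "/").1 min_value max_value
       && !(PySem.Str.isIn "/" (splitOnce token "/").1)
   else preBase token min_value max_value) = true

instance (token : String) (min_value : Int) (max_value : Int) : Decidable (Pre_parse_token_py token min_value max_value) := by unfold Pre_parse_token_py; infer_instance

def pvWitness_parse_token_py : String × Int × Int := ("1-10/3", 0, 59)

def Spec_parse_token_py (token : String) (min_value : Int) (max_value : Int) (out : List Int) : Prop := out = parse_token_py_alt token min_value max_value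
instance (token : String) (min_value : Int) (max_value : Int) (out : List Int) : Decidable (Spec_parse_token_py token min_value max_value out) := by unfold Spec_parse_token_py; infer_instance

-- ===== CLAIM (what is proved, stated in full; the proofs are below) =====
def Claim_equal_parse_token_py : Prop := ∀ (token : String) (min_value : Int) (max_value : Int), Dom_parse_token_py token min_value max_value → Pre_parse_token_py token min_value max_value → Spec_parse_token_py token min_value max_value (parse_token_py token min_value max_value)

-- ===== LEMMAS AND PROOFS =====

-- the stepped range is strictly increasing
lemma pairwise_lt_pyRange_pos (a b step : Int) (hs : 0 < step) :
    (PySem.List.pyRange a b step).Pairwise (· < ·) := by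
  rw [PySem.List.pyRange_of_pos a b hs]
  exact List.Pairwise.map _ (fun p q hpq => by nlinarith [Int.ofNat_lt.mpr hpq]) List.pairwise_lt_range

-- A's filter over the contiguous range IS the stepped range
lemma filter_mod_pyRange (s t step : Int) (hs : 0 < step) :
    (PySem.List.pyRange s t 1).filter (fun v => PySem.Int.mod (v - s) step == 0)
      = PySem.List.pyRange s t step := by
  have h1 : ((PySem.List.pyRange s t 1).filter
      (fun v => PySem.Int.mod (v - s) step == 0)).Pairwise (· < ·) :=
    (PySem.List.pairwise_lt_pyRange_one s t).filter _
  have h2 := pairwise_lt_pyRange_pos s t step hs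
  have hmem : ∀ x : Int,
      x ∈ (PySem.List.pyRange s t 1).filter (fun v => PySem.Int.mod (v - s) step == 0)
        ↔ x ∈ PySem.List.pyRange s t step := by
    intro x
    rw [List.mem_filter, PySem.List.mem_pyRange_iff_of_pos hs,
        PySem.List.mem_pyRange_one]
    constructor
    · rintro ⟨⟨hx1, hx2⟩, hdvd⟩
      exact ⟨hx1, hx2, (PySem.Int.mod_eq_zero_iff_dvd (x - s) step).mp (by simpa using hdvd)⟩
    · rintro ⟨hx1, hx2, hdvd⟩
      exact ⟨⟨hx1, hx2⟩, by simpa using (PySem.Int.mod_eq_zero_iff_dvd (x - s) step).mpr hdvd⟩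
  exact List.Perm.eq_of_pairwise (fun a b _ _ hab hba => absurd hba (not_lt.mpr (le_of_lt hab))) h1 h2
    ((List.perm_ext_iff_of_nodup (h1.nodup) (h2.nodup)).mpr hmem)

lemma min?_pyRange_one (s t : Int) (h : s < t) :
    PySem.List.min? (PySem.List.pyRange s t 1) (fun v => v) = some s := by
  rw [PySem.List.pyRange_one_cons h, PySem.List.min?_id_cons]
  congr 1
  rcases PySem.List.foldl_min_mem (PySem.List.pyRange (s + 1) t 1) s with hm | hm
  · exact hm
  · have h1 := (PySem.List.mem_pyRange_one).mp hm
    have h2 := (PySem.List.foldl_min_le (PySem.List.pyRange (s + 1) t 1) s).1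
    omega

-- bounds produced by pyParseInt?
lemma pyParseInt?_bounds {raw : String} {mn mx v : Int}
    (h : pyParseInt? raw mn mx = some v) : mn ≤ v ∧ v ≤ mx := by
  unfold pyParseInt? at h
  rcases hp : PySem.Int.ofStr? raw with _ | w <;> rw [hp] at h
  · exact absurd h (by simp)
  · by_cases hb : mn ≤ w ∧ w ≤ mx
    · simp [hb] at h; omega
    · simp [hb] at h

-- A's whole '/-free' computation produces exactly the (ofList ∘ range) of B's bounds
lemma parseTokenA_noslash (fuel : Nat) (token : String) (mn mx : Int)
    (h : PySem.Str.isIn "/" token = false) :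
    parseTokenA (fuel + 1) token mn mx
      = (boundsOf? token mn mx).map
          (fun p => PySem.Set.ofList (PySem.List.pyRange p.1 (p.2 + 1) 1)) := by
  rw [parseTokenA, boundsOf?,
    if_neg (show ¬ (PySem.Str.isIn "/" token = true) by rw [h]; simp)]
  by_cases hstar : token = "*"
  · rw [if_pos hstar, if_pos hstar]
    simp
  · rw [if_neg hstar, if_neg hstar]
    by_cases hdash : PySem.Str.isIn "-" token
    · rw [if_pos hdash, if_pos hdash]
      rcases h1 : pyParseInt? (splitOnce token "-").1 mn mx with _ | s
      · simp
      rcases h2 : pyParseInt? (splitOnce token "-").2 mn mx with _ | e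
      · simp
      dsimp only
      by_cases hle : e < s
      · rw [if_pos hle, if_pos hle]; simp
      · rw [if_neg hle, if_neg hle]; simp
    · rw [if_neg hdash, if_neg hdash]
      rcases h1 : pyParseInt? token mn mx with _ | v <;> simp
      exact (PySem.Set.ofList_eq_self_of_nodup _ (by simp)).symm

-- the common '/'-branch core: A's min+sort+filter of a contiguous nonempty range
-- equals B's stepped range
lemma slash_core (s e step : Int) (hstep : 0 < step) (hse : s ≤ e) :
    (match PySem.List.min? (PySem.Set.ofList (PySem.List.pyRange s (e + 1) 1)) (fun v => v) with
     | none => (none : Option (List Int))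
     | some start => some (PySem.Set.ofList
         ((PySem.List.sorted (PySem.Set.ofList (PySem.List.pyRange s (e + 1) 1)) (fun v => v)).filter
           (fun v => PySem.Int.mod (v - start) step == 0))))
      = some (PySem.Set.ofList (PySem.List.pyRange s (e + 1) step)) := by
  have hself : PySem.Set.ofList (PySem.List.pyRange s (e + 1) 1) = PySem.List.pyRange s (e + 1) 1 :=
    PySem.Set.ofList_eq_self_of_nodup _ (PySem.List.nodup_pyRange_one s (e + 1))
  rw [hself, min?_pyRange_one s (e + 1) (by omega)]
  dsimp only
  rw [PySem.List.sorted_eq_self_of_pairwise _ _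
        ((PySem.List.pairwise_lt_pyRange_one s (e + 1)).imp le_of_lt),
      filter_mod_pyRange s (e + 1) step hstep]

lemma boundsOf?_isSome_of_preBase (base : String) (mn mx : Int)
    (h : preBase base mn mx = true) : (boundsOf? base mn mx).isSome := by
  unfold preBase at h
  unfold boundsOf?
  by_cases hstar : base = "*"
  · simp [hstar]
  · rw [if_neg hstar]
    simp only [Bool.or_eq_true, beq_iff_eq] at h
    rcases h with h | h
    · exact absurd h hstar
    by_cases hdash : PySem.Str.isIn "-" base
    · rw [if_pos hdash]; rw [if_pos hdash] at h
      rcases h1 : pyParseInt? (splitOnce base "-").1 mn mx with _ | a <;> rw [h1] at h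
      · simp at h
      rcases h2 : pyParseInt? (splitOnce base "-").2 mn mx with _ | b <;> rw [h2] at h
      · simp at h
      simp only [decide_eq_true_eq] at h
      simp [if_neg (not_lt.mpr h)]
    · rw [if_neg hdash]; rw [if_neg hdash] at h
      rcases h1 : pyParseInt? base mn mx with _ | v <;> rw [h1] at h
      · simp at h
      · simp

lemma boundsOf?_le {base : String} {mn mx s e : Int}
    (h : boundsOf? base mn mx = some (s, e)) : s ≤ e ∨ (s = mn ∧ e = mx) := by
  unfold boundsOf? at h
  by_cases hstar : base = "*"
  · simp [hstar] at h; right; omega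
  · rw [if_neg hstar] at h
    left
    by_cases hdash : PySem.Str.isIn "-" base
    · rw [if_pos hdash] at h
      rcases h1 : pyParseInt? (splitOnce base "-").1 mn mx with _ | a <;> rw [h1] at h
      · simp at h
      rcases h2 : pyParseInt? (splitOnce base "-").2 mn mx with _ | b <;> rw [h2] at h
      · simp at h
      by_cases hle : a > b
      · simp [if_pos hle] at h
      · simp [if_neg hle] at h
        omega
    · rw [if_neg hdash] at h
      rcases h1 : pyParseInt? base mn mx with _ | v <;> rw [h1] at h
      · simp at h
      · simp at h
        omega

-- ===== VERDICT (by name: the statement is the Claim_ definition above) =====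
theorem parse_token_py_spec : Claim_equal_parse_token_py := by
  intro token mn mx _hdom hpre
  unfold Spec_parse_token_py parse_token_py parse_token_py_alt parseTokenB
  unfold Pre_parse_token_py at hpre
  by_cases hslash : PySem.Str.isIn "/" token
  · -- '/' branch
    rw [if_pos hslash] at hpre
    simp only [Bool.and_eq_true, Bool.not_eq_true'] at hpre
    obtain ⟨⟨hstep, hbase⟩, hnos⟩ := hpre
    rcases hst : pyParseInt? (splitOnce token "/").2 1 (mx - mn + 1) with _ | step
    · rw [hst] at hstep; simp at hstep
    have hb := pyParseInt?_bounds hst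
    rw [parseTokenA, if_pos hslash, hst]
    simp only [if_pos hslash, Option.map_some]
    by_cases hstar : (splitOnce token "/").1 = "*"
    · rw [if_pos hstar]
      dsimp only
      rw [slash_core mn mx step (by omega) (by omega)]
      simp [boundsOf?, hstar]
    · rw [if_neg hstar, parseTokenA_noslash 0 _ mn mx hnos]
      rcases hbo : boundsOf? (splitOnce token "/").1 mn mx with _ | ⟨s, e⟩
      · have := boundsOf?_isSome_of_preBase _ mn mx hbase
        rw [hbo] at this; simp at this
      · have hse : s ≤ e := by
          rcases boundsOf?_le hbo with h | h <;> omega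
        simp only [Option.map_some]
        rw [slash_core s e step (by omega) hse]
  · -- no '/' branch
    rw [Bool.not_eq_true] at hslash
    rw [if_neg (show ¬ (PySem.Str.isIn "/" token = true) by rw [hslash]; simp)] at hpre
    rw [parseTokenA_noslash 1 token mn mx hslash]
    rw [if_neg (show ¬ (PySem.Str.isIn "/" token = true) by rw [hslash]; simp)]
    rcases hbo : boundsOf? token mn mx with _ | ⟨s, e⟩
    · have := boundsOf?_isSome_of_preBase token mn mx hpre
      rw [hbo] at this; simp at this
    · simp [hbo]
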